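-- pv_equiv track=rewrite | github.com/L-Forster/open-jet | src/benchmark.py | _synthetic_prompt
-- ===== SOURCE A (Python) =====
-- def _synthetic_prompt(n_prompt: int) -> str:
--     seed = (
--         "OpenJet throughput probe. "
--         "This synthetic context mixes short factual clauses, numbers, and punctuation "
--         "so completion does not collapse into one repeated token. "
--     )
--     parts: list[str] = []
--     i = 0
--     while len(" ".join(parts).split()) < max(1, n_prompt):
--         parts.append(f"{seed} Segment {i}: alpha={i % 17}, beta={i % 29}, gamma={i % 43}.")
--         i += 1
--     return " ".join(parts)
-- ===== SOURCE B (Python) =====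
-- def _synthetic_prompt(n_prompt: int) -> str:
--     seed = (
--         "OpenJet throughput probe. "
--         "This synthetic context mixes short factual clauses, numbers, and punctuation "
--         "so completion does not collapse into one repeated token. "
--     )
--
--     def segment(i: int) -> str:
--         return f"{seed} Segment {i}: alpha={i % 17}, beta={i % 29}, gamma={i % 43}."
--
--     target = max(1, n_prompt)
--     words_per_segment = len(segment(0).split())  # every segment has the same word count
--     n_segments = -(-target // words_per_segment)  # ceil(target / words_per_segment)
--     return " ".join(segment(i) for i in range(n_segments))
-- ===== Notes on version B (the rewrite author's own statement) =====
-- stated objective: faster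
-- what changed: Every segment contributes the same word count, so B computes that count once from a sample segment, derives the needed number of segments by a ceiling division, and joins them in one pass, instead of A's loop that re-joins and re-splits the whole growing prompt on every iteration.
import Mathlib
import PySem

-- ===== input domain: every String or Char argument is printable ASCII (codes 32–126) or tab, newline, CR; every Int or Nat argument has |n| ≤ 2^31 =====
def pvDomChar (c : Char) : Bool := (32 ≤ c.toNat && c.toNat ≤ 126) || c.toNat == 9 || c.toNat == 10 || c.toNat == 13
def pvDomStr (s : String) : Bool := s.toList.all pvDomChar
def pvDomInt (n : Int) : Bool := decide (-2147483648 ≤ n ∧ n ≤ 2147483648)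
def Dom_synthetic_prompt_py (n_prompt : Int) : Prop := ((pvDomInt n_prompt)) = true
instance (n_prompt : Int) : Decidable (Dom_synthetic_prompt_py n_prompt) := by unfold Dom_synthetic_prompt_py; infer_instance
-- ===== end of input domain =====

-- B replaces A's quadratic re-split of the growing prompt by computing the (constant) words-per-segment
-- once and joining the ceiling-division number of segments in one pass (objective: faster).

-- shared helper: the seed text and the per-segment f-string, identical in both Pythons
def pvSeed : String :=
  "OpenJet throughput probe. This synthetic context mixes short factual clauses, numbers, and punctuation so completion does not collapse into one repeated token. "

def pvSeg (i : Int) : String :=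
  pvSeed ++ " Segment " ++ PySem.Int.toStr i ++ ": alpha=" ++ PySem.Int.toStr (PySem.Int.mod i 17)
    ++ ", beta=" ++ PySem.Int.toStr (PySem.Int.mod i 29) ++ ", gamma=" ++ PySem.Int.toStr (PySem.Int.mod i 43) ++ "."

-- ===== PORT A =====
-- A's while loop; fuel (max 1 n).toNat only makes the recursion structural: each iteration adds 27
-- words, so the loop exits before the fuel does (proved in the lemmas below).
def pvLoopA (n : Int) : Nat → List String → Int → String
  | 0, parts, _ => PySem.Str.join " " parts
  | fuel + 1, parts, i =>
    if PySem.List.len (PySem.Str.split₀ (PySem.Str.join " " parts)) < max 1 n then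
      pvLoopA n fuel (parts ++ [pvSeg i]) (i + 1)
    else
      PySem.Str.join " " parts

def synthetic_prompt_py (n_prompt : Int) : String :=
  pvLoopA n_prompt (max 1 n_prompt).toNat [] 0

-- ===== PORT B =====
def synthetic_prompt_py_alt (n_prompt : Int) : String :=
  let target := max 1 n_prompt
  let words_per_segment := PySem.List.len (PySem.Str.split₀ (pvSeg 0))
  let n_segments := -(PySem.Int.floordiv (-target) words_per_segment)
  PySem.Str.join " " ((PySem.List.pyRange 0 n_segments 1).map pvSeg)

-- ===== PRECONDITION & SPEC =====
def Spec_synthetic_prompt_py (n_prompt : Int) (out : String) : Prop := out = synthetic_prompt_py_alt n_prompt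
instance (n_prompt : Int) (out : String) : Decidable (Spec_synthetic_prompt_py n_prompt out) := by unfold Spec_synthetic_prompt_py; infer_instance

-- ===== CLAIM (what is proved, stated in full; the proofs are below) =====
def Claim_equal_synthetic_prompt_py : Prop := ∀ (n_prompt : Int), Dom_synthetic_prompt_py n_prompt → Spec_synthetic_prompt_py n_prompt (synthetic_prompt_py n_prompt)

-- ===== LEMMAS AND PROOFS =====

-- word counting machinery: wcount cs inw = number of words split() finds in cs, given whether a word
-- is already open to the left; wcountF processes a chunk and returns (words closed, word open at end)
def pvWcount : List Char → Bool → Nat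
  | [], inw => if inw then 1 else 0
  | c :: r, inw =>
    if PySem.Chars.isspace c then (if inw then 1 else 0) + pvWcount r false
    else pvWcount r true

def pvWcountF : List Char → Bool → Nat × Bool
  | [], inw => (0, inw)
  | c :: r, inw =>
    if PySem.Chars.isspace c then
      ((if inw then 1 else 0) + (pvWcountF r false).1, (pvWcountF r false).2)
    else pvWcountF r true

theorem pvWcount_append : ∀ (a rest : List Char) (inw : Bool),
    pvWcount (a ++ rest) inw = (pvWcountF a inw).1 + pvWcount rest (pvWcountF a inw).2 := by
  intro a
  induction a with
  | nil => intro rest inw; simp [pvWcountF]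
  | cons c a ih =>
    intro rest inw
    by_cases h : PySem.Chars.isspace c
    · simp [pvWcount, pvWcountF, h, ih]; omega
    · simp [pvWcount, pvWcountF, h, ih]

theorem pvWcount_closed (p : List Char) (inw : Bool) :
    pvWcount p inw = (pvWcountF p inw).1 + (if (pvWcountF p inw).2 then 1 else 0) := by
  have h := pvWcount_append p [] inw
  rw [List.append_nil] at h
  rw [h]
  cases hb : (pvWcountF p inw).2 <;> simp [pvWcount]

theorem pvWcount_append_space (p rest : List Char) (inw : Bool) :
    pvWcount (p ++ ' ' :: rest) inw = pvWcount p inw + pvWcount rest false := by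
  rw [pvWcount_append]
  have hsp : PySem.Chars.isspace ' ' = true := by decide
  have h1 : pvWcount (' ' :: rest) (pvWcountF p inw).2
      = (if (pvWcountF p inw).2 then 1 else 0) + pvWcount rest false := by
    simp [pvWcount, hsp]
  rw [h1, pvWcount_closed p inw]
  omega

theorem pvGo_length : ∀ (cs cur : List Char) (acc : List (List Char)),
    (PySem.Chars.split₀.go cs cur acc).length = acc.length + pvWcount cs (!cur.isEmpty) := by
  intro cs
  induction cs with
  | nil =>
    intro cur acc
    cases cur <;> simp [PySem.Chars.split₀.go, pvWcount]
  | cons c rest ih =>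
    intro cur acc
    by_cases h : PySem.Chars.isspace c
    · cases cur with
      | nil =>
        rw [show PySem.Chars.split₀.go (c :: rest) [] acc = PySem.Chars.split₀.go rest [] acc from
          by simp [PySem.Chars.split₀.go, h]]
        rw [ih]
        simp [pvWcount, h]
      | cons d ds =>
        rw [show PySem.Chars.split₀.go (c :: rest) (d :: ds) acc
              = PySem.Chars.split₀.go rest [] ((d :: ds).reverse :: acc) from
          by simp [PySem.Chars.split₀.go, h]]
        rw [ih]
        simp [pvWcount, h]
        omega
    · rw [show PySem.Chars.split₀.go (c :: rest) cur acc
            = PySem.Chars.split₀.go rest (c :: cur) acc from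
        by simp [PySem.Chars.split₀.go, h]]
      rw [ih]
      cases cur <;> simp [pvWcount, h]

theorem pvSplit₀_length (cs : List Char) :
    (PySem.Chars.split₀ cs).length = pvWcount cs false := by
  rw [PySem.Chars.split₀]
  simpa using pvGo_length cs [] []

-- digit strings (str(i) for i ≥ 0) are nonempty and contain no whitespace
set_option maxHeartbeats 1000000 in
theorem pvDigitChar_not_space (m : Nat) : PySem.Chars.isspace (Nat.digitChar m) = false := by
  rcases m with _|_|_|_|_|_|_|_|_|_|_|_|_|_|_|_|k
  all_goals first
    | decide
    | (unfold Nat.digitChar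
       repeat rw [if_neg (by omega)]
       decide)

theorem pvToDigitsCore_not_space : ∀ (f n : Nat) (l : List Char),
    (∀ c ∈ l, PySem.Chars.isspace c = false) →
    ∀ c ∈ Nat.toDigitsCore 10 f n l, PySem.Chars.isspace c = false := by
  intro f
  induction f with
  | zero => intro n l hl; simpa [Nat.toDigitsCore] using hl
  | succ f ih =>
    intro n l hl c hc
    simp only [Nat.toDigitsCore] at hc
    by_cases h : n / 10 = 0
    · rw [if_pos h] at hc
      rcases List.mem_cons.mp hc with rfl | hc
      · exact pvDigitChar_not_space _
      · exact hl c hc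
    · rw [if_neg h] at hc
      refine ih (n / 10) (Nat.digitChar (n % 10) :: l) ?_ c hc
      intro d hd
      rcases List.mem_cons.mp hd with rfl | hd
      · exact pvDigitChar_not_space _
      · exact hl d hd

theorem pvToDigitsCore_len : ∀ (f n : Nat) (l : List Char),
    l.length ≤ (Nat.toDigitsCore 10 f n l).length := by
  intro f
  induction f with
  | zero => intro n l; simp [Nat.toDigitsCore]
  | succ f ih =>
    intro n l
    simp only [Nat.toDigitsCore]
    by_cases h : n / 10 = 0
    · rw [if_pos h]; simp
    · rw [if_neg h]
      have := ih (n / 10) (Nat.digitChar (n % 10) :: l)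
      simp at this; omega

theorem pvToChars_ok (i : Int) (hi : 0 ≤ i) :
    PySem.Int.toChars i ≠ [] ∧ ∀ c ∈ PySem.Int.toChars i, PySem.Chars.isspace c = false := by
  rw [PySem.Int.toChars, if_neg (by omega)]
  constructor
  · rw [Nat.toDigits]
    simp only [Nat.toDigitsCore]
    by_cases h : i.toNat / 10 = 0
    · rw [if_pos h]; simp
    · rw [if_neg h]
      have := pvToDigitsCore_len (i.toNat) (i.toNat / 10) [Nat.digitChar (i.toNat % 10)]
      intro he; rw [he] at this; simp at this
  · exact pvToDigitsCore_not_space _ _ [] (by simp)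

theorem pvWcount_digits : ∀ (d : List Char), d ≠ [] →
    (∀ c ∈ d, PySem.Chars.isspace c = false) →
    ∀ (rest : List Char) (inw : Bool), pvWcount (d ++ rest) inw = pvWcount rest true := by
  intro d
  induction d with
  | nil => intro h; exact absurd rfl h
  | cons c d ih =>
    intro _ hns rest inw
    have hc : PySem.Chars.isspace c = false := hns c (by simp)
    simp only [List.cons_append, pvWcount, hc, Bool.false_eq_true, if_false]
    cases d with
    | nil => simp
    | cons e d' => exact ih (by simp) (fun x hx => hns x (by simp [hx])) rest true

theorem pvMod_nonneg (i b : Int) (hb : 0 < b) : 0 ≤ PySem.Int.mod i b := by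
  simp only [PySem.Int.mod]
  rw [Int.fmod_eq_emod]
  have := Int.emod_nonneg i (show b ≠ 0 by omega)
  split_ifs <;> omega

-- every segment string splits into exactly 27 words
set_option maxRecDepth 10000 in
set_option maxHeartbeats 1000000 in
theorem pvSeg_wcount (i : Int) (hi : 0 ≤ i) : pvWcount (pvSeg i).toList false = 27 := by
  obtain ⟨h1ne, h1ns⟩ := pvToChars_ok i hi
  obtain ⟨h2ne, h2ns⟩ := pvToChars_ok (PySem.Int.mod i 17) (pvMod_nonneg i _ (by norm_num))
  obtain ⟨h3ne, h3ns⟩ := pvToChars_ok (PySem.Int.mod i 29) (pvMod_nonneg i _ (by norm_num))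
  obtain ⟨h4ne, h4ns⟩ := pvToChars_ok (PySem.Int.mod i 43) (pvMod_nonneg i _ (by norm_num))
  have hF0 : pvWcountF pvSeed.toList false = (22, false) := by decide
  have hF1 : pvWcountF (" Segment " : String).toList false = (1, false) := by decide
  have hF2 : pvWcountF (": alpha=" : String).toList true = (1, true) := by decide
  have hF3 : pvWcountF (", beta=" : String).toList true = (1, true) := by decide
  have hF4 : pvWcountF (", gamma=" : String).toList true = (1, true) := by decide
  have hlast : pvWcount ("." : String).toList true = 1 := by decide
  rw [pvSeg]
  simp only [String.toList_append, List.append_assoc, PySem.Int.toList_toStr]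
  rw [pvWcount_append, hF0]
  rw [pvWcount_append, hF1]
  rw [pvWcount_digits _ h1ne h1ns]
  rw [pvWcount_append, hF2]
  rw [pvWcount_digits _ h2ne h2ns]
  rw [pvWcount_append, hF3]
  rw [pvWcount_digits _ h3ne h3ns]
  rw [pvWcount_append, hF4]
  rw [pvWcount_digits _ h4ne h4ns]
  rw [hlast]
  norm_num

-- word count of a " "-join is the sum of the word counts of the parts
theorem pvWc_join : ∀ (ps : List (List Char)),
    pvWcount (PySem.Chars.join [' '] ps) false = (ps.map (fun p => pvWcount p false)).sum := by
  intro ps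
  induction ps with
  | nil => simp [PySem.Chars.join_nil, pvWcount]
  | cons p ps ih =>
    cases ps with
    | nil => simp [PySem.Chars.join_singleton]
    | cons q rest =>
      rw [PySem.Chars.join_cons_cons]
      have : p ++ [' '] ++ PySem.Chars.join [' '] (q :: rest)
           = p ++ ' ' :: PySem.Chars.join [' '] (q :: rest) := by simp
      rw [this, pvWcount_append_space, ih]
      simp

-- the joined prompt made of the first j segments has exactly 27*j words
set_option maxRecDepth 10000 in
set_option maxHeartbeats 1000000 in
theorem pvJoin_count (j : Nat) :
    pvWcount (PySem.Str.join " " ((PySem.List.pyRange 0 (j : Int) 1).map pvSeg)).toList false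
      = 27 * j := by
  rw [PySem.Str.toList_join]
  have hsp : (" " : String).toList = [' '] := rfl
  rw [hsp, List.map_map, pvWc_join, List.map_map]
  have hmap : ((PySem.List.pyRange 0 (j : Int) 1).map
      ((fun p => pvWcount p false) ∘ String.toList ∘ pvSeg))
      = (PySem.List.pyRange 0 (j : Int) 1).map (fun _ => 27) := by
    apply List.map_congr_left
    intro i hi
    have h0i : (0 : Int) ≤ i := (PySem.List.mem_pyRange_one.mp hi).1
    simp only [Function.comp_apply]
    exact pvSeg_wcount i h0i
  rw [hmap, List.map_const', List.sum_replicate, PySem.List.length_pyRange_one]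
  simp [smul_eq_mul, Nat.mul_comm]

theorem pvCond_val (j : Nat) :
    PySem.List.len (PySem.Str.split₀ (PySem.Str.join " " ((PySem.List.pyRange 0 (j : Int) 1).map pvSeg)))
      = ((27 * j : Nat) : Int) := by
  rw [PySem.List.len_eq, PySem.Str.split₀, List.length_map, pvSplit₀_length, pvJoin_count]

theorem pvRange_succ (j : Nat) :
    PySem.List.pyRange 0 ((j : Int) + 1) 1
      = PySem.List.pyRange 0 (j : Int) 1 ++ [(j : Int)] := by
  rw [PySem.List.pyRange_one_append 0 (j : Int) ((j : Int) + 1) (by omega) (by omega)]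
  congr 1
  rw [PySem.List.pyRange_one_cons (by omega)]
  congr 1
  have : (PySem.List.pyRange ((j : Int) + 1) ((j : Int) + 1) 1).length = 0 := by
    rw [PySem.List.length_pyRange_one]; omega
  exact List.eq_nil_of_length_eq_zero this

theorem pvLoop_eq (n : Int) (K : Nat)
    (hup : max 1 n ≤ 27 * (K : Int))
    (hlo : ∀ j : Nat, j < K → (27 * j : Int) < max 1 n) :
    ∀ (fuel j : Nat), j ≤ K → K ≤ j + fuel →
      pvLoopA n fuel ((PySem.List.pyRange 0 (j : Int) 1).map pvSeg) (j : Int)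
        = PySem.Str.join " " ((PySem.List.pyRange 0 (K : Int) 1).map pvSeg) := by
  intro fuel
  induction fuel with
  | zero =>
    intro j hjK hKj
    have : j = K := by omega
    subst this
    simp [pvLoopA]
  | succ fuel ih =>
    intro j hjK hKj
    simp only [pvLoopA, pvCond_val j]
    by_cases hj : j < K
    · rw [if_pos (by push_cast; exact_mod_cast hlo j hj)]
      have hlist : ((PySem.List.pyRange 0 (j : Int) 1).map pvSeg) ++ [pvSeg (j : Int)]
          = (PySem.List.pyRange 0 (((j + 1 : Nat) : Int)) 1).map pvSeg := by
        push_cast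
        rw [pvRange_succ j, List.map_append]
        simp
      rw [hlist]
      have : ((j : Int) + 1) = (((j + 1 : Nat) : Int)) := by push_cast; ring
      rw [this]
      exact ih (j + 1) (by omega) (by omega)
    · have : j = K := by omega
      subst this
      rw [if_neg (by push_cast at hup ⊢; omega)]

theorem pvW0 : PySem.List.len (PySem.Str.split₀ (pvSeg 0)) = 27 := by
  rw [PySem.List.len_eq, PySem.Str.split₀, List.length_map, pvSplit₀_length,
    pvSeg_wcount 0 (by omega)]
  norm_num

-- ===== VERDICT (by name: the statement is the Claim_ definition above) =====
theorem synthetic_prompt_py_spec : Claim_equal_synthetic_prompt_py := by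
  intro n _
  unfold Spec_synthetic_prompt_py synthetic_prompt_py synthetic_prompt_py_alt
  rw [pvW0]
  show pvLoopA n (max 1 n).toNat [] 0
      = PySem.Str.join " " ((PySem.List.pyRange 0 (-(PySem.Int.floordiv (-(max 1 n)) 27)) 1).map pvSeg)
  set t : Int := max 1 n with ht
  have ht1 : 1 ≤ t := by omega
  have hfd : PySem.Int.floordiv (-t) 27 = (-t) / 27 := by
    simp [PySem.Int.floordiv, Int.fdiv_eq_ediv]
  rw [hfd]
  set q : Int := -((-t) / 27) with hq
  have hq1 : 1 ≤ q ∧ t ≤ 27 * q ∧ 27 * q < t + 27 := by omega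
  have hK : ((q.toNat : Int)) = q := by omega
  have hKt : q.toNat ≤ t.toNat := by omega
  have := pvLoop_eq n q.toNat (by rw [hK]; omega)
    (fun j hj => by
      have h1 : (j : Int) < q := by omega
      omega)
    t.toNat 0 (by omega) (by omega)
  simp only [Nat.cast_zero] at this
  have hnil : (PySem.List.pyRange 0 (0 : Int) 1).map pvSeg = [] := by
    have : (PySem.List.pyRange (0 : Int) 0 1).length = 0 := by
      rw [PySem.List.length_pyRange_one]; rfl
    rw [List.eq_nil_of_length_eq_zero this]; rfl
  rw [hnil] at this
  rw [show (max 1 n).toNat = t.toNat from rfl] at this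
  rw [this, hK]
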